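-- pv_equiv track=rewrite | github.com/neomatrix369/microgpt-experiments | run_report/text_loss_plot.py | bin_step_ranges
-- ===== SOURCE A (Python) =====
-- def bin_step_ranges(n_steps: int, n_bins: int) -> list[tuple[int, int]]:
--     """Inclusive step index range per bin (matches chunk boundaries in :func:`bin_stats`)."""
--     if n_bins <= 0:
--         raise ValueError("n_bins must be positive")
--     ranges: list[tuple[int, int]] = []
--     for i in range(n_bins):
--         start = i * n_steps // n_bins
--         end = (i + 1) * n_steps // n_bins - 1
--         ranges.append((start, end))
--     return ranges
-- ===== SOURCE B (Python) =====
-- def bin_step_ranges(n_steps: int, n_bins: int) -> list[tuple[int, int]]: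
--     """Inclusive step index range per bin, by Bresenham-style error accumulation:
--     one divmod up front, then each boundary advances by q plus an occasional carry."""
--     if n_bins <= 0:
--         raise ValueError("n_bins must be positive")
--     q, r = divmod(n_steps, n_bins)
--     ranges = []
--     start = 0
--     acc = 0
--     for _ in range(n_bins):
--         acc += r
--         end = start + q
--         if acc >= n_bins:
--             acc -= n_bins
--             end += 1
--         ranges.append((start, end - 1))
--         start = end
--     return ranges
-- ===== Notes on version B (the rewrite author's own statement) =====
-- stated objective: alternative
-- what changed: B does one divmod up front and generates boundaries incrementally by Bresenham-style error accumulation (each end advances by q plus an occasional carry when the remainder accumulator overflows), instead of recomputing i*n_steps//n_bins with a multiplication and division per bin.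
import Mathlib
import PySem

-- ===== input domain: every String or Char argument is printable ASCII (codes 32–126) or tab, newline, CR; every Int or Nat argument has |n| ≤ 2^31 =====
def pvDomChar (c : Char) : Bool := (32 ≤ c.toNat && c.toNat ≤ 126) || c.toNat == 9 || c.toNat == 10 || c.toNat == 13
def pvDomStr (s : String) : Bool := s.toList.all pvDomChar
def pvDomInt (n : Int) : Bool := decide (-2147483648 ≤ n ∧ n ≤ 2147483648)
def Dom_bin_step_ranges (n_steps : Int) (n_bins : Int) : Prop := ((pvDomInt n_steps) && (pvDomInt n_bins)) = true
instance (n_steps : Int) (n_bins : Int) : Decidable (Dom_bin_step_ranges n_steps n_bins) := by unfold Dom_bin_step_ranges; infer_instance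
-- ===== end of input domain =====

-- B replaces the per-bin i*n_steps//n_bins recomputation by one up-front divmod and
-- Bresenham-style error accumulation (additive boundary advance with carry); alternative algorithm, same asymptotic cost.

-- ===== PORT A =====
-- A raises ValueError when n_bins ≤ 0; that branch is excluded by Pre_ (the port returns [] there).
def bin_step_ranges (n_steps : Int) (n_bins : Int) : List (Int × Int) :=
  if n_bins ≤ 0 then []
  else
    (PySem.List.pyRange 0 n_bins 1).foldl
      (fun ranges i =>
        ranges ++ [(PySem.Int.floordiv (i * n_steps) n_bins,
                    PySem.Int.floordiv ((i + 1) * n_steps) n_bins - 1)]) []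

-- ===== PORT B =====
-- loop body of Source B: state is (ranges, start, acc)
def bsrStep (q r n_bins : Int) (st : List (Int × Int) × Int × Int) : List (Int × Int) × Int × Int :=
  let acc := st.2.2 + r
  let e := st.2.1 + q
  let p := if acc ≥ n_bins then (acc - n_bins, e + 1) else (acc, e)
  (st.1 ++ [(st.2.1, p.2 - 1)], p.2, p.1)

def bin_step_ranges_alt (n_steps : Int) (n_bins : Int) : List (Int × Int) :=
  if n_bins ≤ 0 then []
  else
    let q := PySem.Int.floordiv n_steps n_bins
    let r := PySem.Int.mod n_steps n_bins
    ((PySem.List.pyRange 0 n_bins 1).foldl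
      (fun st _ => bsrStep q r n_bins st) ([], 0, 0)).1

-- ===== PRECONDITION & SPEC =====
-- Pre_ excludes n_bins ≤ 0, on which the Python A raises ValueError.
def Pre_bin_step_ranges (n_steps : Int) (n_bins : Int) : Prop := 0 < n_bins
instance (n_steps : Int) (n_bins : Int) : Decidable (Pre_bin_step_ranges n_steps n_bins) := by unfold Pre_bin_step_ranges; infer_instance
def pvWitness_bin_step_ranges : Int × Int := (10, 3)

def Spec_bin_step_ranges (n_steps : Int) (n_bins : Int) (out : List (Int × Int)) : Prop := out = bin_step_ranges_alt n_steps n_bins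
instance (n_steps : Int) (n_bins : Int) (out : List (Int × Int)) : Decidable (Spec_bin_step_ranges n_steps n_bins out) := by unfold Spec_bin_step_ranges; infer_instance

-- ===== CLAIM (what is proved, stated in full; the proofs are below) =====
def Claim_equal_bin_step_ranges : Prop := ∀ (n_steps : Int) (n_bins : Int), Dom_bin_step_ranges n_steps n_bins → Pre_bin_step_ranges n_steps n_bins → Spec_bin_step_ranges n_steps n_bins (bin_step_ranges n_steps n_bins)

-- ===== LEMMAS AND PROOFS =====

-- A's append-accumulator loop is a map over the range.
theorem foldl_append_map {α β : Type} (f : α → β) (l : List α) (init : List β) :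
    l.foldl (fun acc i => acc ++ [f i]) init = init ++ l.map f := by
  induction l generalizing init with
  | nil => simp
  | cons x xs ih => simp [List.foldl_cons, ih]

-- a fold whose body ignores the element is an iterate of the step
theorem foldl_ignore {α β : Type} (f : β → β) (l : List α) (init : β) :
    l.foldl (fun s _ => f s) init = f^[l.length] init := by
  induction l generalizing init with
  | nil => simp
  | cons x xs ih => simp [List.foldl_cons, ih, Function.iterate_succ_apply]

-- division/remainder of a value in [0, 2k)
theorem div_mod_small (k x : Int) (h0 : 0 ≤ x) (h2 : x < 2 * k) :
    x / k = (if k ≤ x then 1 else 0) ∧ x % k = x - (if k ≤ x then k else 0) := by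
  have hk : 0 < k := by omega
  split_ifs with h
  · have hx : x = (x - k) + k * 1 := by ring
    constructor
    · rw [hx, Int.add_mul_ediv_left _ _ (by omega : k ≠ 0),
        Int.ediv_eq_zero_of_lt (by omega) (by omega)]
      norm_num
    · rw [hx, Int.add_mul_emod_self_left, Int.emod_eq_of_lt (by omega) (by omega)]
      ring
  · exact ⟨Int.ediv_eq_zero_of_lt h0 (by omega),
      by rw [Int.emod_eq_of_lt h0 (by omega)]; ring⟩

-- how boundary and remainder advance from bin m to bin m+1
theorem succ_div_mod (n k m : Int) (hk : 0 < k) :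
    ((m + 1) * n) / k = (m * n) / k + n / k + (if k ≤ (m * n) % k + n % k then 1 else 0) ∧
    ((m + 1) * n) % k = (m * n) % k + n % k - (if k ≤ (m * n) % k + n % k then k else 0) := by
  have h1 := Int.ediv_add_emod (m * n) k
  have h2 := Int.ediv_add_emod n k
  have ha0 : 0 ≤ (m * n) % k := Int.emod_nonneg _ (by omega)
  have ha1 : (m * n) % k < k := Int.emod_lt_of_pos _ hk
  have hb0 : 0 ≤ n % k := Int.emod_nonneg _ (by omega)
  have hb1 : n % k < k := Int.emod_lt_of_pos _ hk
  have key : (m + 1) * n = ((m * n) % k + n % k) + k * ((m * n) / k + n / k) := by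
    linear_combination -h1 - h2
  obtain ⟨hd, hm⟩ := div_mod_small k ((m * n) % k + n % k) (by omega) (by omega)
  constructor
  · rw [key, Int.add_mul_ediv_left _ _ (by omega : k ≠ 0), hd]
    split_ifs <;> ring
  · rw [key, Int.add_mul_emod_self_left, hm]

-- the Bresenham loop's invariant: after m iterations the state holds the first m bins,
-- the boundary (m*n)/k and the remainder accumulator (m*n)%k
theorem bsr_iter (n k : Int) (hk : 0 < k) (m : ℕ) :
    (bsrStep (n / k) (n % k) k)^[m] (([], 0, 0) : List (Int × Int) × Int × Int)
      = ((List.range m).map (fun j : ℕ => (((j : Int) * n) / k, (((j : Int) + 1) * n) / k - 1)),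
         ((m : Int) * n) / k, ((m : Int) * n) % k) := by
  induction m with
  | zero => simp
  | succ m ih =>
    rw [Function.iterate_succ_apply', ih]
    obtain ⟨hd, hm⟩ := succ_div_mod n k (m : Int) hk
    unfold bsrStep
    simp only [Nat.cast_add, Nat.cast_one, ge_iff_le, Prod.mk.injEq, List.range_succ,
      List.map_append, List.map_cons, List.map_nil]
    rw [hd, hm]
    split_ifs with hcond <;>
      refine ⟨?_, by ring, by ring⟩ <;>
      · simp only [List.append_right_inj, List.cons.injEq, Prod.mk.injEq, and_true]
        try exact ⟨trivial, by ring⟩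

theorem bin_step_ranges_spec : Claim_equal_bin_step_ranges := by
  intro n_steps n_bins _ hpre
  unfold Spec_bin_step_ranges bin_step_ranges bin_step_ranges_alt
  have hk : 0 < n_bins := hpre
  have h : ¬ n_bins ≤ 0 := by omega
  simp only [h, if_false]
  rw [foldl_append_map, foldl_ignore,
    PySem.Int.floordiv_eq_ediv_of_pos hk, PySem.Int.mod_eq_emod_of_pos hk,
    PySem.List.length_pyRange_one, bsr_iter n_steps n_bins hk]
  rw [PySem.List.pyRange_one]
  simp only [List.map_map, List.nil_append, Int.sub_zero]
  apply List.map_congr_left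
  intro a ha
  simp [PySem.Int.floordiv_eq_ediv_of_pos hk]
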